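-- pv_equiv track=rewrite | github.com/srikanthtraining25/test | src/utils.py | escape_dn_value
-- ===== SOURCE A (Python) =====
-- def escape_dn_value(value: str) -> str:
--     """
--     Escapes a value for use in a Distinguished Name (DN) as per RFC 4514.
--     """
--     if not value:
--         return ""
--
--     escaped = ""
--     # Characters requiring escaping: , + " \ < > ;
--     special_chars = {',', '+', '"', '\\', '<', '>', ';'}
--
--     # Leading #
--     if value.startswith('#'):
--         escaped += '\\' + value[0]
--         start_index = 1
--     elif value.startswith(' '):
--         escaped += '\\' + value[0]
--         start_index = 1
--     else:
--         start_index = 0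
--
--     for i in range(start_index, len(value)):
--         char = value[i]
--         if char in special_chars:
--             escaped += '\\' + char
--         else:
--             escaped += char
--
--     # Trailing space
--     if escaped.endswith(' ') and not escaped.endswith('\\ '):
--          # If the last char was space, it wasn't escaped in the loop (unless it was special, but space isn't in special_chars)
--          # So we need to escape the last space.
--          # But wait, we iterate char by char.
--          # The logic above is: if char is special, escape it. Space is not in special_chars.
--          # So we just appended space.
--          # If it is the last char, we need to replace it with '\ '
--          escaped = escaped[:-1] + '\\ '
--
--     return escaped
-- ===== SOURCE B (Python) =====
-- def escape_dn_value(value: str) -> str: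
--     if not value:
--         return ""
--     result = value.replace('\\', '\\\\')
--     for ch in ',+"<>;':
--         result = result.replace(ch, '\\' + ch)
--     if value.startswith('#') or value.startswith(' '):
--         result = '\\' + result
--     if result.endswith(' ') and not result.endswith('\\ '):
--         result = result[:-1] + '\\ '
--     return result
-- ===== Notes on version B (the rewrite author's own statement) =====
-- stated objective: idiomatic
-- what changed: B replaces the per-character index loop with accumulator concatenation by whole-string str.replace passes (backslash first, then each remaining special character), a single prepended backslash for a leading '#'/' ', and the same trailing-space fix.
import Mathlib
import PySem

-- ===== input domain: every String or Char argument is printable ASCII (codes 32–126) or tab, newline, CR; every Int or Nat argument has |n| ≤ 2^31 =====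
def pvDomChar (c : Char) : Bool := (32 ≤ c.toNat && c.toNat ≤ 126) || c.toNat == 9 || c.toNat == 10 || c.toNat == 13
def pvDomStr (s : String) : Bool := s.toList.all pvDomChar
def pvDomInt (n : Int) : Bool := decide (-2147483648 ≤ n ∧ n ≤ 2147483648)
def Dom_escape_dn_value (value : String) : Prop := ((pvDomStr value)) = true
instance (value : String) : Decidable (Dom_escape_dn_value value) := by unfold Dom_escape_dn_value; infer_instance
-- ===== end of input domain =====

-- B rewrites A's per-character index loop as successive whole-string replace passes (idiomatic); equal return value on all inputs.

-- ===== PORT A =====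
-- A's special_chars set (7 distinct char literals; used only for membership tests)
def pvSpecials : List Char := [',', '+', '"', '\\', '<', '>', ';']

-- loop body of A: escaped built left-to-right over the chars the index loop visits
def pvLoopA (st : List Char × List Char) : List Char :=
  st.2.foldl (fun acc ch =>
      if pvSpecials.contains ch then acc ++ ['\\', ch] else acc ++ [ch]) st.1

-- trailing-space fix of A; escaped[:-1] on a char list is dropLast (exact for Python's s[:-1])
def pvTrailA (escaped : List Char) : List Char :=
  if PySem.Chars.endswith escaped [' '] && !(PySem.Chars.endswith escaped ['\\', ' '])
  then escaped.dropLast ++ ['\\', ' '] else escaped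

-- leading '#' / ' ' handling of A: initial escaped ('\\' + value[0]) and the chars the
-- loop over range(start_index, len(value)) visits (value[start_index:])
def pvStartA (v : List Char) : List Char × List Char :=
  if PySem.Chars.startswith v ['#'] then (['\\'] ++ v.take 1, v.drop 1)
  else if PySem.Chars.startswith v [' '] then (['\\'] ++ v.take 1, v.drop 1)
  else ([], v)

def escape_dn_value (value : String) : String :=
  if value.toList.isEmpty then ""  -- if not value: return ""
  else String.mk (pvTrailA (pvLoopA (pvStartA value.toList)))

-- ===== PORT B =====
-- the specials replaced after the backslash pass, in Source B's order
def pvSpecialsB : List Char := [',', '+', '"', '<', '>', ';']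

-- Source B's prepend of a single backslash for a leading '#' or ' '
def pvLeadB (v r1 : List Char) : List Char :=
  if PySem.Chars.startswith v ['#'] || PySem.Chars.startswith v [' ']
  then '\\' :: r1 else r1

-- Source B's trailing-space fix (same textual step as in A's source); result[:-1] is dropLast
def pvTrailB (r2 : List Char) : List Char :=
  if PySem.Chars.endswith r2 [' '] && !(PySem.Chars.endswith r2 ['\\', ' '])
  then r2.dropLast ++ ['\\', ' '] else r2

def escape_dn_value_alt (value : String) : String :=
  if value.toList.isEmpty then "" else
  String.mk (pvTrailB (pvLeadB value.toList
    (pvSpecialsB.foldl (fun r c => PySem.Chars.replace r [c] ['\\', c])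
      (PySem.Chars.replace value.toList ['\\'] ['\\', '\\']))))

-- ===== PRECONDITION & SPEC =====
def Spec_escape_dn_value (value : String) (out : String) : Prop := out = escape_dn_value_alt value
instance (value : String) (out : String) : Decidable (Spec_escape_dn_value value out) := by unfold Spec_escape_dn_value; infer_instance

-- ===== CLAIM (what is proved, stated in full; the proofs are below) =====
def Claim_equal_escape_dn_value : Prop := ∀ (value : String), Dom_escape_dn_value value → Spec_escape_dn_value value (escape_dn_value value)

-- ===== LEMMAS AND PROOFS =====

-- the per-character escaping both programs effectively perform
def pvEscG (ch : Char) : List Char := if pvSpecials.contains ch then ['\\', ch] else [ch]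

-- single-character replace is a per-character flatMap
theorem pv_go_single (c : Char) (new : List Char) :
    ∀ (l : List Char) (fuel : Nat) (acc : List Char), l.length ≤ fuel →
      PySem.Chars.replace.go [c] new fuel l acc
        = acc.reverse ++ l.flatMap (fun ch => if ch = c then new else [ch]) := by
  intro l
  induction l with
  | nil =>
      intro fuel acc _
      cases fuel <;> simp [PySem.Chars.replace.go]
  | cons ch t ih =>
      intro fuel acc hle
      cases fuel with
      | zero => simp at hle
      | succ f =>
        rw [PySem.Chars.replace.go]
        by_cases hc : ch = c
        · subst hc
          have hp : ([ch].isPrefixOf (ch :: t)) = true := by simp [List.isPrefixOf]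
          rw [if_pos hp]
          simp only [List.length_cons, List.length_nil, Nat.zero_add, List.drop_succ_cons,
            List.drop_zero]
          rw [ih f (new.reverse ++ acc) (Nat.le_of_succ_le_succ hle)]
          simp
        · have hp : ([c].isPrefixOf (ch :: t)) = false := by
            simp only [List.isPrefixOf, Bool.and_true, beq_eq_false_iff_ne, ne_eq]
            intro h; exact hc h.symm
          rw [if_neg (by simp [hp])]
          rw [ih f (ch :: acc) (Nat.le_of_succ_le_succ hle)]
          simp [hc]

theorem pv_replace_single (s : List Char) (c : Char) (new : List Char) :
    PySem.Chars.replace s [c] new = s.flatMap (fun ch => if ch = c then new else [ch]) := by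
  rw [PySem.Chars.replace, if_neg (by simp)]
  rw [pv_go_single c new s s.length [] (le_refl _)]
  simp

-- the six replace passes after the backslash pass realise the per-character map pvEscG
theorem pv_chain_eq (v : List Char) :
    pvSpecialsB.foldl (fun r c => PySem.Chars.replace r [c] ['\\', c])
      (PySem.Chars.replace v ['\\'] ['\\', '\\'])
      = v.flatMap pvEscG := by
  simp only [pvSpecialsB, List.foldl_cons, List.foldl_nil]
  rw [pv_replace_single v]
  rw [pv_replace_single, pv_replace_single, pv_replace_single, pv_replace_single,
      pv_replace_single, pv_replace_single]
  simp only [List.flatMap_assoc]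
  refine List.flatMap_congr (fun ch _ => ?_)
  · by_cases h0 : ch = '\\'
    · subst h0; decide
    by_cases h1 : ch = ','
    · subst h1; decide
    by_cases h2 : ch = '+'
    · subst h2; decide
    by_cases h3 : ch = '"'
    · subst h3; decide
    by_cases h4 : ch = '<'
    · subst h4; decide
    by_cases h5 : ch = '>'
    · subst h5; decide
    by_cases h6 : ch = ';'
    · subst h6; decide
    simp [pvEscG, pvSpecials, h0, h1, h2, h3, h4, h5, h6]

-- A's escaping loop is init ++ flatMap pvEscG
theorem pv_foldA (tail init : List Char) :
    tail.foldl (fun acc ch =>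
        if pvSpecials.contains ch then acc ++ ['\\', ch] else acc ++ [ch]) init
      = init ++ tail.flatMap pvEscG := by
  have hbody : (fun (acc : List Char) ch =>
      if pvSpecials.contains ch then acc ++ ['\\', ch] else acc ++ [ch])
      = fun acc ch => acc ++ pvEscG ch := by
    funext acc ch; unfold pvEscG; split <;> rfl
  rw [hbody]
  exact PySem.List.foldl_append_eq_flatMap pvEscG tail init

-- the two pre-trailing strings agree
theorem pv_core (c0 : Char) (rest : List Char) :
    pvLoopA (pvStartA (c0 :: rest)) = pvLeadB (c0 :: rest) ((c0 :: rest).flatMap pvEscG) := by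
  unfold pvStartA pvLoopA pvLeadB
  by_cases h0 : c0 = '#'
  · subst h0
    have hsw : PySem.Chars.startswith ('#' :: rest) ['#'] = true := by
      simp [PySem.Chars.startswith, List.isPrefixOf]
    rw [hsw]
    simp only [if_true, Bool.true_or, List.take_succ_cons, List.take_zero, List.drop_succ_cons,
      List.drop_zero]
    rw [pv_foldA]
    simp [pvEscG, pvSpecials]
  · by_cases h1 : c0 = ' '
    · subst h1
      have hns : PySem.Chars.startswith (' ' :: rest) ['#'] = false := by
        simp [PySem.Chars.startswith, List.isPrefixOf]
      have hsw : PySem.Chars.startswith (' ' :: rest) [' '] = true := by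
        simp [PySem.Chars.startswith, List.isPrefixOf]
      rw [hns, hsw]
      simp only [Bool.false_eq_true, if_false, if_true, Bool.or_true, List.take_succ_cons,
        List.take_zero, List.drop_succ_cons, List.drop_zero]
      rw [pv_foldA]
      simp [pvEscG, pvSpecials]
    · have hns : PySem.Chars.startswith (c0 :: rest) ['#'] = false := by
        simp [PySem.Chars.startswith, List.isPrefixOf]
        intro h; exact h0 h.symm
      have hns' : PySem.Chars.startswith (c0 :: rest) [' '] = false := by
        simp [PySem.Chars.startswith, List.isPrefixOf]
        intro h; exact h1 h.symm
      rw [hns, hns']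
      simp only [Bool.false_eq_true, if_false, Bool.or_self]
      rw [pv_foldA]
      simp

-- the two trailing-space fixes are the same function
theorem pv_trail_eq (l : List Char) : pvTrailA l = pvTrailB l := rfl

-- ===== VERDICT (by name: the statement is the Claim_ definition above) =====
theorem escape_dn_value_spec : Claim_equal_escape_dn_value := by
  intro value _
  unfold Spec_escape_dn_value
  unfold escape_dn_value escape_dn_value_alt
  cases h : value.toList with
  | nil => simp
  | cons c0 rest =>
      simp only [List.isEmpty_cons, Bool.false_eq_true, if_false]
      rw [pv_chain_eq, pv_core, pv_trail_eq]
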